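-- pv_equiv track=rewrite | github.com/gberriz/datarail-2.0-old | src/kyub.py | _get_perm
-- ===== SOURCE A (Python) =====
-- def _get_perm(s, t):
--     """
--     Return the list p such that t[i] == s[p[i]] for all i.
--
--     The arguments s and t must be duplicate-free iterables of known
--     length such that t is a permutation of s (or, equivalently, s is a
--     permutation of t).
--
--     The following invariants will always hold for any valid iterables
--     s and t:
--
--         list(t) == [s[i] for i in _get_perm(s, t)]
--         range(len(s)) == _get_perm(s, s)
--     """
--
--     n = len(s)
--     assert n == len(set(s))
--     assert sorted(s) == sorted(t)
--     if s == t: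
--         return range(n)
--     i = dict((k, j) for j, k in enumerate(s))
--     return [i[k] for k in t]
-- ===== SOURCE B (Python) =====
-- def _get_perm(s, t):
--     """
--     Return the list p such that t[i] == s[p[i]] for all i.
--
--     Sorting-based alignment: argsort s and t by value; since s and t
--     hold the same distinct values, matching ranks pair equal values,
--     so scattering source indices by rank yields the permutation.
--     """
--     n = len(s)
--     assert n == len(set(s))
--     assert sorted(s) == sorted(t)
--     if s == t:
--         return range(n)
--     order_s = sorted(range(n), key=lambda j: s[j])
--     order_t = sorted(range(n), key=lambda j: t[j])
--     p = [None] * n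
--     for dst, src in zip(order_t, order_s):
--         p[dst] = src
--     return p
-- ===== Notes on version B (the rewrite author's own statement) =====
-- stated objective: alternative
-- what changed: Replaces the value->index hash map and gather over t by an argsort of both lists and a rank-pairing scatter of source indices; no dictionary is built.
import Mathlib
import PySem

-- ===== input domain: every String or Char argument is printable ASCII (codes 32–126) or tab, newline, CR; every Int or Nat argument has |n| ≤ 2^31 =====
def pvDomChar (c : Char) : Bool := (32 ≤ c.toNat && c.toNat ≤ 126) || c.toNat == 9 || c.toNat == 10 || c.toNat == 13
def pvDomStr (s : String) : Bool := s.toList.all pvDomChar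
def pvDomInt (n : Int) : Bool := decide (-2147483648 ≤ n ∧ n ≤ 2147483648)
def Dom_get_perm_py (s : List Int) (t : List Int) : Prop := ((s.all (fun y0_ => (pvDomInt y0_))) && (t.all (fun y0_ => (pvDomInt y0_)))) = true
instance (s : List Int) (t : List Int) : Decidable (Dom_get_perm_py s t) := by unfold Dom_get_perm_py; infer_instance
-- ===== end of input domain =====

-- B replaces A's value->index dictionary and gather over t by an argsort of both
-- lists and a rank-pairing scatter of source indices (alternative algorithm, same cost).

-- ===== PORT A =====
-- A's two asserts (s duplicate-free, sorted(s) == sorted(t)) raise AssertionError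
-- outside Pre_get_perm_py; inside Pre_ the dict lookup i[k] always succeeds, so
-- getD 0 is exact there.
def get_perm_py (s : List Int) (t : List Int) : List Int :=
  let n : Int := PySem.List.len s
  if s = t then PySem.List.pyRange 0 n 1
  else
    let i : PySem.Dict Int Int :=
      (PySem.List.enumerate s).foldl (fun d jk => d.insert jk.2 jk.1) PySem.Dict.empty
    t.map (fun k => i.getD k 0)

-- ===== PORT B =====
-- Python's p = [None] * n is ported with placeholder 0: inside Pre_ every slot is
-- overwritten (order_t is a permutation of range(n)), so the placeholder is never
-- returned; q.1 is an element of range(n), hence nonnegative, so .toNat is exact.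
def get_perm_py_alt (s : List Int) (t : List Int) : List Int :=
  let n : Int := PySem.List.len s
  if s = t then PySem.List.pyRange 0 n 1
  else
    let orderS := PySem.List.sorted (PySem.List.pyRange 0 n 1) (fun j => PySem.List.pyGetD s j 0)
    let orderT := PySem.List.sorted (PySem.List.pyRange 0 n 1) (fun j => PySem.List.pyGetD t j 0)
    (orderT.zip orderS).foldl (fun p q => p.set q.1.toNat q.2) (List.replicate s.length 0)

-- ===== PRECONDITION & SPEC =====
-- Pre_ is exactly A's two asserts: s has no duplicates and t is a rearrangement of s
-- (sorted(s) == sorted(t)); outside it A raises AssertionError.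
def Pre_get_perm_py (s : List Int) (t : List Int) : Prop :=
  s.Nodup ∧ s.Perm t
instance (s : List Int) (t : List Int) : Decidable (Pre_get_perm_py s t) := by unfold Pre_get_perm_py; infer_instance

def pvWitness_get_perm_py : List Int × List Int := ([3, 1, 2], [1, 2, 3])

def Spec_get_perm_py (s : List Int) (t : List Int) (out : List Int) : Prop := out = get_perm_py_alt s t
instance (s : List Int) (t : List Int) (out : List Int) : Decidable (Spec_get_perm_py s t out) := by unfold Spec_get_perm_py; infer_instance

-- ===== CLAIM (what is proved, stated in full; the proofs are below) =====
def Claim_equal_get_perm_py : Prop := ∀ (s : List Int) (t : List Int), Dom_get_perm_py s t → Pre_get_perm_py s t → Spec_get_perm_py s t (get_perm_py s t)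

-- ===== LEMMAS AND PROOFS =====

-- scatter loop: length is preserved
theorem pv_scatter_length (l : List (Int × Int)) (init : List Int) :
    (l.foldl (fun p q => p.set q.1.toNat q.2) init).length = init.length := by
  induction l generalizing init with
  | nil => rfl
  | cons a l ih => simpa [List.foldl_cons] using ih (init.set a.1.toNat a.2)

-- scatter loop: a slot no pair targets is untouched
theorem pv_scatter_untouched (l : List (Int × Int)) (init : List Int) (i : Nat)
    (h : ∀ q ∈ l, q.1.toNat ≠ i) :
    (l.foldl (fun p q => p.set q.1.toNat q.2) init)[i]? = init[i]? := by
  induction l generalizing init with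
  | nil => rfl
  | cons a l ih =>
    rw [List.foldl_cons, ih _ (fun q hq => h q (List.mem_cons_of_mem a hq)),
      List.getElem?_set_ne (h a (List.mem_cons_self))]

-- scatter loop over pairwise-distinct nonnegative destinations: slot as[r] holds bs[r]
theorem pv_scatter_get (as bs : List Int) (init : List Int)
    (hnd : as.Nodup) (hnn : ∀ a ∈ as, 0 ≤ a)
    (r : Nat) (hr : r < as.length) (hbr : r < bs.length)
    (hlt : as[r].toNat < init.length) :
    ((as.zip bs).foldl (fun p q => p.set q.1.toNat q.2) init)[as[r].toNat]? = some bs[r] := by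
  induction as generalizing bs init r with
  | nil => simp at hr
  | cons a as ih =>
    match bs, hbr with
    | b :: bs, hbr =>
      rw [List.zip_cons_cons, List.foldl_cons]
      match r, hr, hbr with
      | 0, _, _ =>
        simp only [List.getElem_cons_zero]
        have hne : ∀ q ∈ as.zip bs, q.1.toNat ≠ a.toNat := by
          intro q hq
          have hmem : q.1 ∈ as := (List.of_mem_zip hq).1
          have h1 : q.1 ≠ a := fun h => (List.nodup_cons.mp hnd).1 (h ▸ hmem)
          have h0q : 0 ≤ q.1 := hnn _ (List.mem_cons_of_mem a hmem)
          have h0a : 0 ≤ a := hnn a List.mem_cons_self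
          omega
        rw [pv_scatter_untouched _ _ _ hne]
        exact List.getElem?_set_self (by simpa using hlt)
      | r + 1, hr, hbr =>
        have := ih bs (init.set a.toNat b) (List.nodup_cons.mp hnd).2
          (fun x hx => hnn x (List.mem_cons_of_mem a hx))
          r (by simpa using Nat.lt_of_succ_lt_succ hr) (Nat.lt_of_succ_lt_succ hbr)
          (by simpa using hlt)
        simpa using this

-- A's dict maps each element of s to its (unique) index
theorem pv_dict_char (s : List Int) (hnd : s.Nodup) (k : Int) (hk : k ∈ s) :
    ((PySem.List.enumerate s).foldl (fun d jk => d.insert jk.2 jk.1)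
      (PySem.Dict.empty : PySem.Dict Int Int)).getD k 0 = (s.idxOf k : Int) := by
  have hsnd : (List.map (fun jk => jk.2) (PySem.List.enumerate s (0 : Int))) = s :=
    PySem.List.map_snd_enumerate s 0
  have hitems := PySem.Dict.items_foldl_insert_fresh (PySem.List.enumerate s)
    (fun jk => jk.2) (fun jk => jk.1) (PySem.Dict.empty : PySem.Dict Int Int)
    (by intro a _; simp [PySem.Dict.contains_empty])
    (by rw [hsnd]; exact hnd)
  have hkeys : ((PySem.List.enumerate s).foldl (fun d jk => d.insert jk.2 jk.1)
      (PySem.Dict.empty : PySem.Dict Int Int)).keys = s := by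
    simp only [PySem.Dict.keys, hitems, List.map_append, List.map_map]
    simp [PySem.Dict.empty, Function.comp_def, hsnd]
  have hkl : s.idxOf k < s.length := List.idxOf_lt_length_of_mem hk
  have hmem : (k, (s.idxOf k : Int)) ∈ ((PySem.List.enumerate s).foldl
      (fun d jk => d.insert jk.2 jk.1) (PySem.Dict.empty : PySem.Dict Int Int)).items := by
    rw [hitems]
    refine List.mem_append_right _ (List.mem_map.mpr ⟨((s.idxOf k : Int), k), ?_, rfl⟩)
    exact (PySem.List.mem_enumerate_iff s 0 _).mpr
      ⟨s.idxOf k, hkl, by simp [List.getElem_idxOf hkl]⟩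
  exact PySem.Dict.getD_of_mem_items _ hmem (by rw [hkeys]; exact hnd) 0

-- under Pre_ the two key-maps of the argsorts coincide rank by rank
theorem pv_argsort_align (s t : List Int) (hperm : s.Perm t) :
    List.map (fun j => PySem.List.pyGetD s j 0)
      (PySem.List.sorted (PySem.List.pyRange 0 (PySem.List.len s) 1) (fun j => PySem.List.pyGetD s j 0))
    = List.map (fun j => PySem.List.pyGetD t j 0)
      (PySem.List.sorted (PySem.List.pyRange 0 (PySem.List.len t) 1) (fun j => PySem.List.pyGetD t j 0)) := by
  refine PySem.List.eq_of_perm_of_pairwise_le_of_injective (fun x => x) (fun a b h => h) ?_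
    (PySem.List.sorted_map_key_pairwise _ _) (PySem.List.sorted_map_key_pairwise _ _)
  have h1 : (List.map (fun j => PySem.List.pyGetD s j 0)
      (PySem.List.sorted (PySem.List.pyRange 0 (PySem.List.len s) 1) (fun j => PySem.List.pyGetD s j 0))).Perm s := by
    have := (PySem.List.sorted_perm (PySem.List.pyRange 0 (PySem.List.len s) 1)
      (fun j => PySem.List.pyGetD s j 0) false).map (fun j => PySem.List.pyGetD s j 0)
    rw [PySem.List.map_pyGetD_pyRange_zero s 0] at this
    exact this
  have h2 : (List.map (fun j => PySem.List.pyGetD t j 0)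
      (PySem.List.sorted (PySem.List.pyRange 0 (PySem.List.len t) 1) (fun j => PySem.List.pyGetD t j 0))).Perm t := by
    have := (PySem.List.sorted_perm (PySem.List.pyRange 0 (PySem.List.len t) 1)
      (fun j => PySem.List.pyGetD t j 0) false).map (fun j => PySem.List.pyGetD t j 0)
    rw [PySem.List.map_pyGetD_pyRange_zero t 0] at this
    exact this
  exact h1.trans (hperm.trans h2.symm)

-- ===== VERDICT (by name: the statement is the Claim_ definition above) =====
theorem get_perm_py_spec : Claim_equal_get_perm_py := by
  intro s t _ hpre
  unfold Spec_get_perm_py get_perm_py get_perm_py_alt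
  obtain ⟨hnd, hperm⟩ := hpre
  by_cases hst : s = t
  · simp [hst]
  · simp only [if_neg hst]
    have hlen : t.length = s.length := hperm.length_eq.symm
    have hlenS : (PySem.List.len s) = (s.length : Int) := PySem.List.len_eq s
    have hrng : PySem.List.pyRange 0 (PySem.List.len s) 1
        = (List.range s.length).map (fun k : Nat => (k : Int)) := by
      rw [hlenS]; exact PySem.List.pyRange_zero_natCast s.length
    set σ := PySem.List.sorted (PySem.List.pyRange 0 (PySem.List.len s) 1)
      (fun j => PySem.List.pyGetD s j 0) with hσ
    set τ := PySem.List.sorted (PySem.List.pyRange 0 (PySem.List.len s) 1)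
      (fun j => PySem.List.pyGetD t j 0) with hτ
    have hσperm : σ.Perm (PySem.List.pyRange 0 (PySem.List.len s) 1) :=
      PySem.List.sorted_perm _ _ _
    have hτperm : τ.Perm (PySem.List.pyRange 0 (PySem.List.len s) 1) :=
      PySem.List.sorted_perm _ _ _
    have hrngnd : (PySem.List.pyRange 0 (PySem.List.len s) 1).Nodup := by
      rw [hrng]
      exact List.nodup_range.map (fun a b h => by exact_mod_cast h)
    have hτnd : τ.Nodup := hτperm.symm.nodup hrngnd
    have hσlen : σ.length = s.length := by rw [hσperm.length_eq, hrng]; simp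
    have hτlen : τ.length = s.length := by rw [hτperm.length_eq, hrng]; simp
    have hmemrng : ∀ x ∈ PySem.List.pyRange 0 (PySem.List.len s) 1,
        ∃ m : Nat, m < s.length ∧ x = (m : Int) := by
      intro x hx
      rw [hrng] at hx
      obtain ⟨m, hm, rfl⟩ := List.mem_map.mp hx
      exact ⟨m, List.mem_range.mp hm, rfl⟩
    have hmemσ : ∀ x ∈ σ, ∃ m : Nat, m < s.length ∧ x = (m : Int) :=
      fun x hx => hmemrng x (hσperm.mem_iff.mp hx)
    have hmemτ : ∀ x ∈ τ, ∃ m : Nat, m < s.length ∧ x = (m : Int) :=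
      fun x hx => hmemrng x (hτperm.mem_iff.mp hx)
    have halign := pv_argsort_align s t hperm
    have hlenT : PySem.List.len t = PySem.List.len s := by
      rw [PySem.List.len_eq, PySem.List.len_eq, hlen]
    rw [hlenT, ← hσ, ← hτ] at halign
    apply List.ext_getElem?
    intro i
    by_cases hi : i < s.length
    · -- left: A's gather; right: B's scatter
      have hti : t[i]'(by omega) ∈ s := hperm.mem_iff.mpr (List.getElem_mem _)
      rw [List.getElem?_map, List.getElem?_eq_getElem (show i < t.length by omega)]
      simp only [Option.map_some]
      rw [pv_dict_char s hnd _ hti]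
      obtain ⟨r, hr, hri⟩ : ∃ r, ∃ hr : r < τ.length, τ[r] = (i : Int) := by
        have hmi : (i : Int) ∈ τ := hτperm.mem_iff.mpr (by
          rw [hrng]; exact List.mem_map.mpr ⟨i, List.mem_range.mpr hi, rfl⟩)
        obtain ⟨r, hr, h⟩ := List.getElem_of_mem hmi
        exact ⟨r, hr, h⟩
      have hσr : r < σ.length := by omega
      have hτnn : ∀ a ∈ τ, 0 ≤ a := by
        intro a ha; obtain ⟨m, _, rfl⟩ := hmemτ a ha; positivity
      have hB := pv_scatter_get τ σ (List.replicate s.length 0) hτnd hτnn r hr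
        (by omega) (by rw [hri]; simpa using hi)
      rw [hri] at hB
      simp only [Int.toNat_natCast] at hB
      rw [hB]
      obtain ⟨m, hm, hσm⟩ := hmemσ (σ[r]'hσr) (List.getElem_mem _)
      have hkey : PySem.List.pyGetD s (σ[r]'hσr) 0 = PySem.List.pyGetD t (τ[r]'hr) 0 := by
        have h1 := congrArg (fun l => l[r]?) halign
        simp only [List.getElem?_map] at h1
        rw [List.getElem?_eq_getElem hσr, List.getElem?_eq_getElem hr] at h1
        simpa using h1
      rw [hσm, hri, PySem.List.pyGetD_natCast, PySem.List.pyGetD_natCast] at hkey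
      have hsm : s[m]'hm = t[i]'(by omega) := by
        rw [List.getD_eq_getElem s 0 hm, List.getD_eq_getElem t 0 (by omega)] at hkey
        exact hkey
      have hidx : s.idxOf (t[i]'(by omega)) = m := by
        have hkl : s.idxOf (t[i]'(by omega)) < s.length := List.idxOf_lt_length_of_mem hti
        have heq : s[s.idxOf (t[i]'(by omega))]'hkl = s[m]'hm := by
          rw [List.getElem_idxOf hkl, hsm]
        exact hnd.getElem_inj_iff.mp heq
      rw [hσm, hidx]
    · rw [List.getElem?_eq_none (by simp; omega),
        List.getElem?_eq_none (by rw [pv_scatter_length]; simp; omega)]
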